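-- pv_equiv track=rewrite | github.com/animeshokhade/dsa | scaler/Single Number III.py | solve
-- ===== SOURCE A (Python) =====
-- def solve(A):
--     ans = []
--     temp = 0
--     B = sorted(A)
--     for i in range(len(B) - 1):
--         if (B[i] != B[i - 1]) and (B[i] != B[i + 1]):
--             ans.append(B[i])
--
--     if B[-1] != B[-2]:
--         ans.append(B[-1])
--     return ans
-- ===== SOURCE B (Python) =====
-- def solve(A):
--     counts = {}
--     for x in A:
--         counts[x] = counts.get(x, 0) + 1
--     return sorted(k for k, v in counts.items() if v == 1)
-- ===== Notes on version B (the rewrite author's own statement) =====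
-- stated objective: idiomatic
-- what changed: Replaces A's sort-then-neighbor-comparison index scan by a one-pass frequency dict followed by sorting the keys whose count is 1.
-- outside the precondition, e.g. on solve([]): A raises IndexError, B returns []; on solve([3]): A raises IndexError, B returns [3]
-- crash fix: On lists of length < 2 A raises IndexError (it reads the penultimate element of the sorted list); B returns the list of once-occurring elements there too: the empty list for an empty input and the singleton itself for a one-element input. — e.g. on solve([3]): A raises IndexError, B returns [3]
import Mathlib
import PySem

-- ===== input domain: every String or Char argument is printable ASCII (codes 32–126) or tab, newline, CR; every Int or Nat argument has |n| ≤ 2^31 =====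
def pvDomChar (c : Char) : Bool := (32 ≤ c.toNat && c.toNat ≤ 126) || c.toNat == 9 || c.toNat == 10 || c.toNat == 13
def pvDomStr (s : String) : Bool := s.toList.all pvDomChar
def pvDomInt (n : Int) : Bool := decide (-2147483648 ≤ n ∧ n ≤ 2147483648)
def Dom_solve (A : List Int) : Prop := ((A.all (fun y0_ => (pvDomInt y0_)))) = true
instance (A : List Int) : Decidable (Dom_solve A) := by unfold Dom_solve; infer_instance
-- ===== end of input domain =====

-- B replaces A's sort-then-neighbor-comparison scan by a one-pass frequency dict + sort of the once-only keys (idiomatic; neither mutates its argument).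

-- ===== PORT A =====
def solve (A : List Int) : List Int :=
  let B := PySem.List.sorted A (fun x => x) false
  let ans := (PySem.List.pyRange 0 ((B.length : Int) - 1) 1).foldl
    (fun ans i =>
      if PySem.List.pyGetD B i 0 ≠ PySem.List.pyGetD B (i - 1) 0 ∧
         PySem.List.pyGetD B i 0 ≠ PySem.List.pyGetD B (i + 1) 0
      then ans ++ [PySem.List.pyGetD B i 0] else ans) ([] : List Int)
  if PySem.List.pyGetD B (-1) 0 ≠ PySem.List.pyGetD B (-2) 0
  then ans ++ [PySem.List.pyGetD B (-1) 0] else ans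

-- ===== PORT B =====
def solve_alt (A : List Int) : List Int :=
  let counts := A.foldl (fun d x => d.insert x (d.getD x 0 + 1)) (PySem.Dict.empty : PySem.Dict Int Int)
  PySem.List.sorted ((counts.items.filter (fun p => p.2 == (1 : Int))).map (·.1)) (fun x => x) false

-- ===== PRECONDITION & SPEC =====
-- Pre_ excludes exactly the lists of length < 2, on which A raises IndexError reading the penultimate element.
def Pre_solve (A : List Int) : Prop := 2 ≤ A.length
instance (A : List Int) : Decidable (Pre_solve A) := by unfold Pre_solve; infer_instance
def pvWitness_solve : List Int := [4, 1, 4]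

-- On lists of length < 2 A raises IndexError (it reads the penultimate element); B returns the once-occurring elements there too: empty for empty, the singleton for a singleton.
def Raises_solve (A : List Int) : Prop := A.length < 2
instance (A : List Int) : Decidable (Raises_solve A) := by unfold Raises_solve; infer_instance
def pvRaiseWitness_solve : List Int := [3]
def pvRaiseWitnessOut_solve : List Int := [3]

def Spec_solve (A : List Int) (out : List Int) : Prop := out = solve_alt A
instance (A : List Int) (out : List Int) : Decidable (Spec_solve A out) := by unfold Spec_solve; infer_instance

-- ===== CLAIM (what is proved, stated in full; the proofs are below) =====
def Claim_equal_solve : Prop := ∀ (A : List Int), Dom_solve A → Pre_solve A → Spec_solve A (solve A)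
def Claim_raises_solve : Prop := (∀ (A : List Int), Dom_solve A → Raises_solve A → ¬ Pre_solve A) ∧ (Dom_solve (pvRaiseWitness_solve) ∧ Raises_solve (pvRaiseWitness_solve) ∧ solve_alt (pvRaiseWitness_solve) = pvRaiseWitnessOut_solve)

-- ===== LEMMAS AND PROOFS =====

-- index-wise membership: the list as a map over its index range
theorem pv_map_range (S : List Int) : (List.range S.length).map (fun i => S.getD i 0) = S := by
  apply List.ext_getElem
  · simp
  · intro i h1 h2
    simp [List.getD_eq_getElem?_getD, List.getElem?_eq_getElem h2]

-- filtering a list = filtering its index range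
theorem pv_filter_idx (S : List Int) (p : Int → Bool) :
    S.filter p = ((List.range S.length).filter (fun i => p (S.getD i 0))).map (fun i => S.getD i 0) := by
  conv_lhs => rw [← pv_map_range S]
  rw [List.filter_map]
  rfl

theorem pv_count_idx (S : List Int) (x : Int) :
    S.count x = ((List.range S.length).filter (fun i => S.getD i 0 == x)).length := by
  rw [List.count_eq_length_filter, pv_filter_idx S (fun y => y == x), List.length_map]

-- monotonicity of a pairwise-≤ list, through getD
theorem pv_mono (S : List Int) (hS : S.Pairwise (fun a b => a ≤ b)) {i j : Nat}
    (hij : i ≤ j) (hj : j < S.length) : S.getD i 0 ≤ S.getD j 0 := by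
  rcases Nat.lt_or_ge i j with h | h
  · rw [List.getD_eq_getElem _ _ (lt_trans h hj), List.getD_eq_getElem _ _ hj]
    exact (List.pairwise_iff_getElem.mp hS) i j _ _ h
  · have : i = j := le_antisymm hij h
    subst this; exact le_refl _

-- two adjacent equal entries give count ≥ 2
theorem pv_adj_dup (S : List Int) {k : Nat} (hk : k + 1 < S.length)
    (he : S.getD k 0 = S.getD (k+1) 0) : 2 ≤ S.count (S.getD k 0) := by
  rw [← List.replicate_sublist_iff]
  have hk' : k < S.length := by omega
  rw [List.getD_eq_getElem _ _ hk', List.getD_eq_getElem _ _ hk] at he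
  have hd : S.drop k = S[k] :: S[k+1] :: S.drop (k+2) := by
    rw [List.drop_eq_getElem_cons hk', List.drop_eq_getElem_cons hk]
  have hsub : List.Sublist [S[k], S[k+1]] (S.drop k) := by
    rw [hd]
    exact List.Sublist.cons₂ _ (List.Sublist.cons₂ _ (List.nil_sublist _))
  have hrep : List.replicate 2 (S.getD k 0) = [S[k], S[k+1]] := by
    rw [List.getD_eq_getElem _ _ hk', ← he]; rfl
  rw [hrep]
  exact hsub.trans (List.drop_sublist k S)

-- the Boolean neighbour test used after normalising the python loop
def keepB (S : List Int) (k : Nat) : Bool :=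
  (decide (k = 0) || (S.getD k 0 != S.getD (k-1) 0)) &&
  (decide (k = S.length - 1) || (S.getD k 0 != S.getD (k+1) 0))

theorem pv_keep_count (S : List Int) (hS : S.Pairwise (fun a b => a ≤ b)) {k : Nat}
    (hk : k < S.length) : keepB S k = (S.count (S.getD k 0) == 1) := by
  by_cases h : keepB S k = true
  · rw [h]
    obtain ⟨hL, hR⟩ : (k = 0 ∨ S.getD k 0 ≠ S.getD (k-1) 0) ∧
        (k = S.length - 1 ∨ S.getD k 0 ≠ S.getD (k+1) 0) := by
      simpa [keepB, Decidable.or_iff_not_imp_left] using h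
    have hsingle : (List.range S.length).filter (fun j => S.getD j 0 == S.getD k 0) = [k] := by
      have hnd : ((List.range S.length).filter (fun j => S.getD j 0 == S.getD k 0)).Nodup :=
        (List.nodup_range).filter _
      rw [← List.perm_singleton]
      rw [List.perm_ext_iff_of_nodup hnd (List.nodup_singleton k)]
      intro j
      simp only [List.mem_filter, List.mem_range, List.mem_singleton, beq_iff_eq]
      constructor
      · rintro ⟨hj, hjx⟩
        by_contra hne
        rcases Nat.lt_or_ge j k with hlt | hge
        · have hk0 : k ≠ 0 := by omega
          have hLL : S.getD k 0 ≠ S.getD (k-1) 0 := hL.resolve_left hk0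
          have h1 : S.getD j 0 ≤ S.getD (k-1) 0 := pv_mono S hS (by omega) (by omega)
          have h2 : S.getD (k-1) 0 ≤ S.getD k 0 := pv_mono S hS (by omega) hk
          exact hLL (le_antisymm h2 (hjx ▸ h1)).symm
        · have hjk : k < j := by omega
          have hkn : k ≠ S.length - 1 := by omega
          have hRR : S.getD k 0 ≠ S.getD (k+1) 0 := hR.resolve_left hkn
          have h1 : S.getD k 0 ≤ S.getD (k+1) 0 := pv_mono S hS (by omega) (by omega)
          have h2 : S.getD (k+1) 0 ≤ S.getD j 0 := pv_mono S hS (by omega) (by omega)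
          exact hRR (le_antisymm h1 (hjx ▸ h2))
      · rintro rfl; exact ⟨hk, rfl⟩
    rw [pv_count_idx S, hsingle]
    rfl
  · rw [eq_false_of_ne_true h]
    have hdup : 2 ≤ S.count (S.getD k 0) := by
      have : (k ≠ 0 ∧ S.getD k 0 = S.getD (k-1) 0) ∨
          (k ≠ S.length - 1 ∧ S.getD k 0 = S.getD (k+1) 0) := by
        by_contra hc
        push Not at hc
        apply h
        simp only [keepB, Bool.and_eq_true, Bool.or_eq_true, decide_eq_true_eq, bne_iff_ne]
        constructor
        · by_cases h0 : k = 0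
          · exact Or.inl h0
          · exact Or.inr (hc.1 h0)
        · by_cases hn : k = S.length - 1
          · exact Or.inl hn
          · exact Or.inr (hc.2 hn)
      rcases this with ⟨h0, he⟩ | ⟨hn, he⟩
      · have hkm : (k-1) + 1 < S.length := by omega
        have he' : S.getD (k-1) 0 = S.getD ((k-1)+1) 0 := by
          rw [← he]; congr 1; omega
        have := pv_adj_dup S hkm he'
        rwa [he', show (k-1)+1 = k by omega] at this
      · have := pv_adj_dup S (by omega : k + 1 < S.length) he
        exact this
    symm
    simp only [beq_eq_false_iff_ne, ne_eq]
    omega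

theorem pv_solve_eq_filter (A : List Int) (h2 : 2 ≤ A.length) :
    solve A = ((List.range (PySem.List.sorted A (fun x => x) false).length).filter
        (keepB (PySem.List.sorted A (fun x => x) false))).map
        (fun k => (PySem.List.sorted A (fun x => x) false).getD k 0) := by
  unfold solve
  set S := PySem.List.sorted A (fun x => x) false with hSdef
  have hS : S.Pairwise (fun a b => a ≤ b) := by
    simpa using PySem.List.sorted_pairwise (xs := A) (key := fun x => x)
  have hlen : S.length = A.length := PySem.List.length_sorted A (fun x => x) false
  have hn2 : 2 ≤ S.length := hlen ▸ h2
  have hne : S ≠ [] := by intro h; rw [h] at hn2; simp at hn2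
  simp only []
  have hconv : ∀ (acc : List Int),
      (PySem.List.pyRange 0 ((S.length : Int) - 1) 1).foldl
        (fun ans i =>
          if PySem.List.pyGetD S i 0 ≠ PySem.List.pyGetD S (i - 1) 0 ∧
             PySem.List.pyGetD S i 0 ≠ PySem.List.pyGetD S (i + 1) 0
          then ans ++ [PySem.List.pyGetD S i 0] else ans) acc
      = acc ++ ((PySem.List.pyRange 0 ((S.length : Int) - 1) 1).filter
          (fun i => decide (PySem.List.pyGetD S i 0 ≠ PySem.List.pyGetD S (i - 1) 0 ∧
             PySem.List.pyGetD S i 0 ≠ PySem.List.pyGetD S (i + 1) 0))).map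
          (fun i => PySem.List.pyGetD S i 0) := by
    intro acc
    rw [← PySem.List.foldl_append_if]
    apply PySem.List.foldl_congr_mem
    intro b x hx
    simp
  rw [hconv]
  -- normalise the range to List.range over Nat
  have hrange : PySem.List.pyRange 0 ((S.length : Int) - 1) 1
      = (List.range (S.length - 1)).map (fun k : Nat => (k : Int)) := by
    rw [PySem.List.pyRange_one]
    have h0 : ((S.length : Int) - 1 - 0).toNat = S.length - 1 := by omega
    rw [h0]
    simp only [zero_add]
  rw [hrange, List.filter_map, List.map_map]
  have hg : ∀ (k : Nat), PySem.List.pyGetD S (k : Int) 0 = S.getD k 0 := by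
    intro k; simp [PySem.List.pyGetD_natCast]
  have hlast : PySem.List.pyGetD S (-1) 0 = S.getD (S.length - 1) 0 := by
    rw [PySem.List.pyGetD_neg_one S 0 hne, List.getLast_eq_getElem, List.getD_eq_getElem _ _ (by omega)]
  have hpen : PySem.List.pyGetD S (-2) 0 = S.getD (S.length - 2) 0 := by
    rw [PySem.List.pyGetD_neg_ofNat S 2 0 (by omega) (by omega), List.getD_eq_getElem _ _ (by omega)]
  have hfilt : List.filter
      ((fun i => decide (PySem.List.pyGetD S i 0 ≠ PySem.List.pyGetD S (i - 1) 0 ∧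
          PySem.List.pyGetD S i 0 ≠ PySem.List.pyGetD S (i + 1) 0)) ∘ (fun k : Nat => (k : Int)))
      (List.range (S.length - 1)) = List.filter (keepB S) (List.range (S.length - 1)) := by
    apply List.filter_congr
    intro k hk
    rw [List.mem_range] at hk
    simp only [Function.comp]
    rcases Nat.eq_zero_or_pos k with rfl | hkpos
    · have h1 : PySem.List.pyGetD S ((0 : Nat) - 1 : Int) 0 = S.getD (S.length - 1) 0 := by
        norm_num [hlast]
      have h2 : PySem.List.pyGetD S ((0 : Nat) + 1 : Int) 0 = S.getD 1 0 := by
        have := hg 1; norm_num at this ⊢; exact this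
      rw [h1, h2, hg 0]
      have hn1 : ¬ ((0:Nat) = S.length - 1) := by omega
      simp only [keepB, Nat.zero_sub, decide_true, Bool.true_or,
        Bool.true_and, decide_eq_false hn1, Bool.false_or]
      by_cases h01 : S.getD 0 0 = S.getD 1 0
      · simp only [List.getD_eq_getElem?_getD] at h01 ⊢
        simp [h01]
      · have hlt : S.getD 0 0 ≠ S.getD (S.length - 1) 0 := by
          intro hEq
          apply h01
          have ha : S.getD 0 0 ≤ S.getD 1 0 := pv_mono S hS (by omega) (by omega)
          have hb : S.getD 1 0 ≤ S.getD (S.length - 1) 0 := pv_mono S hS (by omega) (by omega)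
          omega
        simp only [List.getD_eq_getElem?_getD] at h01 hlt ⊢
        simp [h01, hlt]
    · have h1 : ((k : Int) - 1) = ((k - 1 : Nat) : Int) := by omega
      have h2 : ((k : Int) + 1) = ((k + 1 : Nat) : Int) := by omega
      rw [h1, h2, hg k, hg (k-1), hg (k+1)]
      have hk0 : ¬ (k = 0) := by omega
      have hkn : ¬ (k = S.length - 1) := by omega
      simp only [keepB, decide_eq_false hk0, decide_eq_false hkn, Bool.false_or, bne,
        List.getD_eq_getElem?_getD, Bool.decide_and, decide_not, Bool.beq_eq_decide_eq]
  rw [hfilt]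
  have hmap : ∀ (l : List Nat), List.map ((fun i => PySem.List.pyGetD S i 0) ∘ (fun k : Nat => (k : Int))) l
      = List.map (fun k => S.getD k 0) l := by
    intro l
    apply List.map_congr_left
    intro k _
    simp only [Function.comp]
    exact hg k
  rw [hmap]
  have hsplit : List.range S.length = List.range (S.length - 1) ++ [S.length - 1] := by
    conv_lhs => rw [show S.length = (S.length - 1) + 1 by omega]
    exact List.range_succ
  conv_rhs => rw [hsplit]
  rw [List.filter_append, List.map_append, List.filter_singleton]
  have hkeeplast : keepB S (S.length - 1) = (S.getD (S.length - 1) 0 != S.getD (S.length - 2) 0) := by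
    have hn0 : ¬ (S.length - 1 = 0) := by omega
    have hsub : S.length - 1 - 1 = S.length - 2 := by omega
    simp [keepB, decide_eq_false hn0, hsub]
  rw [hlast, hpen, hkeeplast]
  simp only [List.getD_eq_getElem?_getD]
  by_cases hcond : S[S.length - 1]?.getD 0 = S[S.length - 2]?.getD 0
  · simp [hcond, Bool.cond_eq_ite]
  · simp [hcond, Bool.cond_eq_ite, bne_iff_ne]

theorem pv_alt_eq (A : List Int) :
    solve_alt A = (PySem.List.sorted A (fun x => x) false).filter
      (fun x => (PySem.List.sorted A (fun x => x) false).count x == 1) := by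
  unfold solve_alt
  simp only []
  set S := PySem.List.sorted A (fun x => x) false with hSdef
  have hfold : A.foldl (fun d x => d.insert x (d.getD x 0 + 1)) (PySem.Dict.empty : PySem.Dict Int Int)
      = PySem.Dict.counter A := rfl
  rw [hfold, PySem.Dict.items_counter, List.filter_map, List.map_map]
  have hL : ((fun p : Int × Int => p.1) ∘ (fun k => (k, (A.count k : Int)))) = (fun k : Int => k) := rfl
  have hSperm : List.Perm S A := PySem.List.sorted_perm A (fun x => x) false
  set L := List.filter ((fun p : Int × Int => p.2 == (1:Int)) ∘ fun k => (k, (A.count k : Int)))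
      (PySem.Set.ofList A) with hLdef
  set T := S.filter (fun x => S.count x == 1) with hTdef
  have hT_sub : List.Sublist T S := by rw [hTdef]; exact List.filter_sublist
  have hS_pair : S.Pairwise (fun a b => a ≤ b) := by
    simpa using PySem.List.sorted_pairwise (xs := A) (key := fun x => x)
  have hT_le : T.Pairwise (fun a b => a ≤ b) := hS_pair.sublist hT_sub
  have hT_nodup : T.Nodup := by
    rw [List.nodup_iff_count_le_one]
    intro x
    by_cases hx : x ∈ T
    · rw [hTdef] at hx
      have hpx : (S.count x == 1) = true := (List.mem_filter.mp hx).2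
      rw [hTdef, List.count_filter (p := fun y => S.count y == 1) hpx]
      simp only [beq_iff_eq] at hpx
      omega
    · rw [List.count_eq_zero_of_not_mem hx]; omega
  have hT_lt : T.Pairwise (fun a b => (fun x : Int => x) a < (fun x : Int => x) b) := by
    have := List.Pairwise.and hT_le hT_nodup
    exact this.imp (fun h => lt_of_le_of_ne h.1 h.2)
  have hL_nodup : L.Nodup := (PySem.Set.nodup_ofList A).filter _
  have hmem : ∀ x, x ∈ T ↔ x ∈ L := by
    intro x
    rw [hTdef, hLdef]
    simp only [List.mem_filter, Function.comp, beq_iff_eq, PySem.Set.mem_ofList]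
    rw [PySem.List.mem_sorted, hSperm.count_eq]
    constructor
    · rintro ⟨h1, h2⟩; exact ⟨h1, by omega⟩
    · rintro ⟨h1, h2⟩; exact ⟨h1, by omega⟩
  have hperm : List.Perm T L := (List.perm_ext_iff_of_nodup hT_nodup hL_nodup).mpr hmem
  rw [hL, List.map_id']
  exact PySem.List.sorted_eq_of_perm_of_pairwise_lt L T (fun x => x) hperm hT_lt

-- A's value: the sorted list filtered to its once-only entries
theorem pv_solve_eq (A : List Int) (h2 : 2 ≤ A.length) :
    solve A = (PySem.List.sorted A (fun x => x) false).filter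
      (fun x => (PySem.List.sorted A (fun x => x) false).count x == 1) := by
  rw [pv_solve_eq_filter A h2]
  set S := PySem.List.sorted A (fun x => x) false with hSdef
  have hS : S.Pairwise (fun a b => a ≤ b) := by
    simpa using PySem.List.sorted_pairwise (xs := A) (key := fun x => x)
  rw [pv_filter_idx S (fun x => S.count x == 1)]
  congr 1
  apply List.filter_congr
  intro k hk
  rw [List.mem_range] at hk
  exact pv_keep_count S hS hk

-- ===== VERDICT (by name: the statement is the Claim_ definition above) =====
theorem solve_spec : Claim_equal_solve := by
  intro A _ hpre
  unfold Spec_solve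
  rw [pv_solve_eq A hpre, pv_alt_eq A]

theorem solve_raises : Claim_raises_solve := by
  unfold Claim_raises_solve
  constructor
  · intro A _ hr hp; unfold Raises_solve at hr; unfold Pre_solve at hp; omega
  · exact ⟨by decide, by decide, by decide⟩

-- self-check: the raise-witness of solve_raises is inside Raises_ and B's port returns the stated literal there
theorem pvRaiseWitness_ok : Raises_solve pvRaiseWitness_solve ∧ solve_alt pvRaiseWitness_solve = pvRaiseWitnessOut_solve :=
  solve_raises.2.2
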